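-- pv_equiv track=rewrite | github.com/SzymonM213/optymalizator | optymalizator/optymalizator_app/helper.py | return_list
-- ===== SOURCE A (Python) =====
-- def return_list(data):
--     new_data = {}
--     for key, values in data.items():
--         if key == 'nazwa_postac_dawka':
--             new_keys = ['nazwa', 'postac', 'dawka']
--             for value in values:
--                 value_parts = value.split(', ')
--                 for i in range(len(new_keys)):
--                     new_key = new_keys[i]
--                     new_value = value_parts[i]
--                     if new_key in new_data:
--                         new_data[new_key].append(new_value)
--                     else:
--                         new_data.update({new_key: [new_value]})
--
--         elif key == 'ean':
--             new_data[key] = ['0' + str(value) for value in values]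
--         else:
--             new_data[key] = values
--
--     rows = [dict(zip(new_data.keys(), values)) for values in zip(*new_data.values())]
--
--     return rows
-- ===== SOURCE B (Python) =====
-- def return_list(data):
--     # Builds the row dicts directly (one pass per row), instead of A's
--     # intermediate transposed dict-of-lists followed by zip.
--     if not data:
--         return []
--     n = min(len(v) for v in data.values())
--     rows = []
--     for i in range(n):
--         row = {}
--         for key, values in data.items():
--             if key == 'nazwa_postac_dawka':
--                 parts = values[i].split(', ')
--                 row['nazwa'] = parts[0]
--                 row['postac'] = parts[1]
--                 row['dawka'] = parts[2]
--             elif key == 'ean':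
--                 row['ean'] = '0' + str(values[i])
--             else:
--                 row[key] = values[i]
--         rows.append(row)
--     return rows
-- ===== Notes on version B (the rewrite author's own statement) =====
-- stated objective: alternative
-- what changed: B builds each output row-dict directly in a single pass per row (row count = min column length computed up front), instead of A's two-phase approach of materialising a transposed dict-of-lists (with append-or-create bookkeeping for the split columns) and then zipping it back into rows.
-- intended difference: When the 'nazwa_postac_dawka' column is the empty list while some other column exists and all other columns are nonempty, A silently drops the nazwa/postac/dawka columns and still emits rows (e.g. [{'cena': '5'}]), while B returns [] — zero complete rows, the intended truncate-to-shortest-column behaviour of the final zip. — e.g. on return_list([("nazwa_postac_dawka", []), ("cena", ["5"])]): A returns [[("cena", "5")]], B returns []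
import Mathlib
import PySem

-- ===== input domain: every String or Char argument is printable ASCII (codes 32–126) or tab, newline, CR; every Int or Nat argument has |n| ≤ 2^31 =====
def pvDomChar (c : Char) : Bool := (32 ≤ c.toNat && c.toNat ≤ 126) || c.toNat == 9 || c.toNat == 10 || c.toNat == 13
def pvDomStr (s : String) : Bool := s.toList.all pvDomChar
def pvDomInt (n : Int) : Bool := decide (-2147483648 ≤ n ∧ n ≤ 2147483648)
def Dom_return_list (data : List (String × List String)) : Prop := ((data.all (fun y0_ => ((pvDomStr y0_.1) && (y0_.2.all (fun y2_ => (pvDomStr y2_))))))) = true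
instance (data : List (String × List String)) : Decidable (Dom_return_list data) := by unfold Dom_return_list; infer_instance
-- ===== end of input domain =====

-- B builds each output row-dict directly (one pass per row) instead of A's transposed
-- dict-of-lists followed by zip; return-value equivalence only (on the excluded
-- column-name-collision inputs A also mutates its argument's lists in place).


-- value.split(', ')  (sep ≠ "", so Str.split? never returns none; exact on the domain)
def pvSplit (value : String) : List String := (PySem.Str.split? value ", ").getD []

-- ===== PORT A =====
-- the body of A's inner 'for value in values' loop (key == 'nazwa_postac_dawka')
def pvAInner (nd : PySem.Dict String (List String)) (value : String) :
    PySem.Dict String (List String) :=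
  let value_parts := pvSplit value
  (PySem.List.pyRange 0 3 1).foldl (fun nd i =>
    let new_key := PySem.List.pyGetD ["nazwa", "postac", "dawka"] i ""
    -- value_parts[i] raises IndexError on a short split; Pre_ keeps it in range
    let new_value := PySem.List.pyGetD value_parts i ""
    match nd.get? new_key with
    | some lst => nd.insert new_key (lst ++ [new_value])
    | none => nd.insert new_key [new_value]) nd

-- the body of A's outer 'for key, values in data.items()' loop
def pvAStep (nd : PySem.Dict String (List String)) (kv : String × List String) :
    PySem.Dict String (List String) :=
  let key := kv.1
  let values := kv.2
  if key == "nazwa_postac_dawka" then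
    values.foldl pvAInner nd
  else if key == "ean" then
    nd.insert key (values.map (fun value => "0" ++ value))
  else
    nd.insert key values

-- zip(*cols): truncating transpose, exact port of the builtin zip over the unpacked columns
def pyZipStar (cols : List (List String)) : List (List String) :=
  match cols with
  | [] => []
  | c :: rest =>
    let n := rest.foldl (fun m c' => min m c'.length) c.length
    (List.range n).map (fun i => cols.map (fun col => col.getD i ""))

def return_list (data : List (String × List String)) : List (List (String × String)) :=
  let new_data := data.foldl pvAStep PySem.Dict.empty
  (pyZipStar new_data.values).map (fun vals => (PySem.Dict.ofList (new_data.keys.zip vals)).items)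

-- ===== PORT B =====
-- the body of B's inner 'for key, values in data.items()' loop for row i
def pvBStep (i : Nat) (row : PySem.Dict String String) (kv : String × List String) :
    PySem.Dict String String :=
  let key := kv.1
  let values := kv.2
  if key == "nazwa_postac_dawka" then
    -- parts[j] raises IndexError on a short split; Pre_ keeps it in range
    let parts := pvSplit (PySem.List.pyGetD values (i : Int) "")
    ((row.insert "nazwa" (PySem.List.pyGetD parts 0 "")).insert "postac"
        (PySem.List.pyGetD parts 1 "")).insert "dawka" (PySem.List.pyGetD parts 2 "")
  else if key == "ean" then
    row.insert "ean" ("0" ++ PySem.List.pyGetD values (i : Int) "")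
  else
    row.insert key (PySem.List.pyGetD values (i : Int) "")

def return_list_alt (data : List (String × List String)) : List (List (String × String)) :=
  match data with
  | [] => []
  | (_, v0) :: rest =>
    let n := rest.foldl (fun m kv => min m kv.2.length) v0.length
    (List.range n).map (fun i => (data.foldl (pvBStep i) PySem.Dict.empty).items)

-- ===== PRECONDITION & SPEC =====
-- Pre_ excludes: (a) inputs where A raises IndexError (a 'nazwa_postac_dawka' value whose
-- split on ', ' has fewer than 3 parts); (b) duplicate keys, which a Python dict argument
-- cannot carry; (c) inputs where a key 'nazwa'/'postac'/'dawka' coexists with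
-- 'nazwa_postac_dawka' — there A's append-into-the-existing-column (which also mutates the
-- caller's list in place) is an accident of its dict bookkeeping and both outputs are defensible.
def Pre_return_list (data : List (String × List String)) : Prop :=
  (data.map Prod.fst).Nodup ∧
  (∀ kv ∈ data, kv.1 = "nazwa_postac_dawka" → ∀ v ∈ kv.2, 3 ≤ (pvSplit v).length) ∧
  ("nazwa_postac_dawka" ∈ data.map Prod.fst →
    "nazwa" ∉ data.map Prod.fst ∧ "postac" ∉ data.map Prod.fst ∧ "dawka" ∉ data.map Prod.fst)
instance (data : List (String × List String)) : Decidable (Pre_return_list data) := by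
  unfold Pre_return_list; infer_instance

def pvWitness_return_list : (List (String × List String)) :=
  [("nazwa_postac_dawka", ["a, b, c", "d, e, f"]), ("ean", ["12", "34"]), ("cena", ["1", "2"])]

-- On inputs whose 'nazwa_postac_dawka' column is the empty list while every other column is
-- nonempty (and at least one other column exists), A silently drops the nazwa/postac/dawka
-- columns and still emits rows; B returns [] (zero complete rows), which is the intended
-- truncate-to-the-shortest-column behaviour of the final zip.
def D_return_list (data : List (String × List String)) : Prop :=
  (∃ kv ∈ data, kv.1 = "nazwa_postac_dawka" ∧ kv.2 = []) ∧
  (∃ kv ∈ data, kv.1 ≠ "nazwa_postac_dawka") ∧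
  (∀ kv ∈ data, kv.1 ≠ "nazwa_postac_dawka" → kv.2 ≠ [])
instance (data : List (String × List String)) : Decidable (D_return_list data) := by
  unfold D_return_list; infer_instance

def Spec_return_list (data : List (String × List String)) (out : List (List (String × String))) : Prop := ¬ D_return_list data → out = return_list_alt data
instance (data : List (String × List String)) (out : List (List (String × String))) : Decidable (Spec_return_list data out) := by unfold Spec_return_list; infer_instance

def pvDiffWitness_return_list : (List (String × List String)) :=
  [("nazwa_postac_dawka", []), ("cena", ["5"])]

def pvDiffWitnessOut_return_list : (List (List (String × String))) × (List (List (String × String))) :=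
  ([[("cena", "5")]], [])

-- ===== CLAIM (what is proved, stated in full; the proofs are below) =====
def Claim_unchanged_return_list : Prop := ∀ (data : List (String × List String)), Dom_return_list data → Pre_return_list data → Spec_return_list data (return_list data)
def Claim_changed_return_list : Prop := Dom_return_list (pvDiffWitness_return_list) ∧ Pre_return_list (pvDiffWitness_return_list) ∧ D_return_list (pvDiffWitness_return_list) ∧ return_list (pvDiffWitness_return_list) = pvDiffWitnessOut_return_list.1 ∧ return_list_alt (pvDiffWitness_return_list) = pvDiffWitnessOut_return_list.2 ∧ pvDiffWitnessOut_return_list.1 ≠ pvDiffWitnessOut_return_list.2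
def Claim_exact_return_list : Prop := ∀ (data : List (String × List String)), Dom_return_list data → Pre_return_list data → D_return_list data → return_list data ≠ return_list_alt data

-- ===== LEMMAS AND PROOFS =====

def pvPart (j : Nat) (v : String) : String := (pvSplit v).getD j ""

def pvBlock (a b c : List String) : List (String × List String) :=
  [("nazwa", a), ("postac", b), ("dawka", c)]

lemma pv_range3 : PySem.List.pyRange 0 3 1 = [(0:Int), 1, 2] := by decide

lemma pv_get?_mk_append {ν : Type} (l1 l2 : List (String × ν)) (k : String)
    (h : ∀ p ∈ l1, p.1 ≠ k) :
    (PySem.Dict.mk (l1 ++ l2)).get? k = (PySem.Dict.mk l2).get? k := by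
  induction l1 with
  | nil => simp
  | cons p t ih =>
    rw [List.cons_append, PySem.Dict.get?_mk_cons]
    simp only [beq_iff_eq]
    rw [if_neg (h p (by simp))]
    exact ih (fun q hq => h q (by simp [hq]))

lemma pv_insert_mk_append {ν : Type} (l1 l2 : List (String × ν)) (k : String) (v : ν)
    (h : ∀ p ∈ l1, p.1 ≠ k) (h2 : l2.any (fun p => p.1 == k) = true) :
    (PySem.Dict.mk (l1 ++ l2)).insert k v
      = PySem.Dict.mk (l1 ++ l2.map (fun p => if p.1 == k then (k, v) else p)) := by
  simp only [PySem.Dict.insert, PySem.Dict.contains]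
  rw [if_pos (by simp [List.any_append, h2])]
  congr 1
  rw [List.map_append]
  congr 1
  conv_rhs => rw [(List.map_id l1).symm]
  apply List.map_congr_left
  intro p hp
  simp [h p hp]



lemma pv_insert_mk_fresh {ν : Type} (l : List (String × ν)) (k : String) (v : ν)
    (h : ∀ p ∈ l, p.1 ≠ k) :
    (PySem.Dict.mk l).insert k v = PySem.Dict.mk (l ++ [(k, v)]) := by
  simp only [PySem.Dict.insert, PySem.Dict.contains]
  rw [if_neg]
  simp only [List.any_eq_true, beq_iff_eq, not_exists]
  intro p hc
  exact h p hc.1 hc.2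

lemma pvAInner_block (l : List (String × List String)) (a b c : List String) (v : String)
    (h : ∀ p ∈ l, p.1 ≠ "nazwa" ∧ p.1 ≠ "postac" ∧ p.1 ≠ "dawka") :
    pvAInner (PySem.Dict.mk (l ++ pvBlock a b c)) v
      = PySem.Dict.mk (l ++ pvBlock (a ++ [pvPart 0 v]) (b ++ [pvPart 1 v]) (c ++ [pvPart 2 v])) := by
  have h1 : ∀ p ∈ l, p.1 ≠ "nazwa" := fun p hp => (h p hp).1
  have h2 : ∀ p ∈ l, p.1 ≠ "postac" := fun p hp => (h p hp).2.1
  have h3 : ∀ p ∈ l, p.1 ≠ "dawka" := fun p hp => (h p hp).2.2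
  unfold pvAInner
  rw [pv_range3]
  simp only [List.foldl_cons, List.foldl_nil, PySem.List.pyGetD_ofNat']
  rw [show (["nazwa", "postac", "dawka"] : List String).getD 0 "" = "nazwa" from rfl,
      show (["nazwa", "postac", "dawka"] : List String).getD 1 "" = "postac" from rfl,
      show (["nazwa", "postac", "dawka"] : List String).getD 2 "" = "dawka" from rfl]
  have g1 : (PySem.Dict.mk (l ++ pvBlock a b c)).get? "nazwa" = some a := by
    rw [pv_get?_mk_append _ _ _ h1]; simp [pvBlock, PySem.Dict.get?_mk_cons]
  rw [g1]
  dsimp only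
  rw [pv_insert_mk_append _ _ _ _ h1 (by simp [pvBlock])]
  have e1 : (pvBlock a b c).map (fun p => if p.1 == "nazwa" then ("nazwa", a ++ [(pvSplit v).getD 0 ""]) else p)
      = pvBlock (a ++ [(pvSplit v).getD 0 ""]) b c := by
    simp [pvBlock]
  rw [e1]
  have g2 : (PySem.Dict.mk (l ++ pvBlock (a ++ [(pvSplit v).getD 0 ""]) b c)).get? "postac" = some b := by
    rw [pv_get?_mk_append _ _ _ h2]; simp [pvBlock, PySem.Dict.get?_mk_cons]
  rw [g2]
  dsimp only
  rw [pv_insert_mk_append _ _ _ _ h2 (by simp [pvBlock])]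
  have e2 : (pvBlock (a ++ [(pvSplit v).getD 0 ""]) b c).map (fun p => if p.1 == "postac" then ("postac", b ++ [(pvSplit v).getD 1 ""]) else p)
      = pvBlock (a ++ [(pvSplit v).getD 0 ""]) (b ++ [(pvSplit v).getD 1 ""]) c := by
    simp [pvBlock]
  rw [e2]
  have g3 : (PySem.Dict.mk (l ++ pvBlock (a ++ [(pvSplit v).getD 0 ""]) (b ++ [(pvSplit v).getD 1 ""]) c)).get? "dawka" = some c := by
    rw [pv_get?_mk_append _ _ _ h3]; simp [pvBlock, PySem.Dict.get?_mk_cons]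
  rw [g3]
  dsimp only
  rw [pv_insert_mk_append _ _ _ _ h3 (by simp [pvBlock])]
  have e3 : (pvBlock (a ++ [(pvSplit v).getD 0 ""]) (b ++ [(pvSplit v).getD 1 ""]) c).map (fun p => if p.1 == "dawka" then ("dawka", c ++ [(pvSplit v).getD 2 ""]) else p)
      = pvBlock (a ++ [(pvSplit v).getD 0 ""]) (b ++ [(pvSplit v).getD 1 ""]) (c ++ [(pvSplit v).getD 2 ""]) := by
    simp [pvBlock]
  rw [e3]
  rfl

lemma pvAInner_foldBlock (vs : List String) : ∀ (l : List (String × List String)) (a b c : List String),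
    (∀ p ∈ l, p.1 ≠ "nazwa" ∧ p.1 ≠ "postac" ∧ p.1 ≠ "dawka") →
    vs.foldl pvAInner (PySem.Dict.mk (l ++ pvBlock a b c))
      = PySem.Dict.mk (l ++ pvBlock (a ++ vs.map (pvPart 0)) (b ++ vs.map (pvPart 1)) (c ++ vs.map (pvPart 2))) := by
  induction vs with
  | nil => intro l a b c h; simp
  | cons v vs ih =>
    intro l a b c h
    rw [List.foldl_cons, pvAInner_block l a b c v h, ih l _ _ _ h]
    simp

lemma pv_get?_mk_none {ν : Type} (l : List (String × ν)) (k : String)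
    (h : ∀ p ∈ l, p.1 ≠ k) : (PySem.Dict.mk l).get? k = none := by
  have := pv_get?_mk_append l [] k h
  simpa using this

lemma pvAInner_start (l : List (String × List String)) (v : String)
    (h : ∀ p ∈ l, p.1 ≠ "nazwa" ∧ p.1 ≠ "postac" ∧ p.1 ≠ "dawka") :
    pvAInner (PySem.Dict.mk l) v
      = PySem.Dict.mk (l ++ pvBlock [pvPart 0 v] [pvPart 1 v] [pvPart 2 v]) := by
  have h1 : ∀ p ∈ l, p.1 ≠ "nazwa" := fun p hp => (h p hp).1
  have h2 : ∀ p ∈ l, p.1 ≠ "postac" := fun p hp => (h p hp).2.1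
  have h3 : ∀ p ∈ l, p.1 ≠ "dawka" := fun p hp => (h p hp).2.2
  unfold pvAInner
  rw [pv_range3]
  simp only [List.foldl_cons, List.foldl_nil, PySem.List.pyGetD_ofNat']
  rw [show (["nazwa", "postac", "dawka"] : List String).getD 0 "" = "nazwa" from rfl,
      show (["nazwa", "postac", "dawka"] : List String).getD 1 "" = "postac" from rfl,
      show (["nazwa", "postac", "dawka"] : List String).getD 2 "" = "dawka" from rfl]
  rw [pv_get?_mk_none l "nazwa" h1]
  dsimp only
  rw [pv_insert_mk_fresh l "nazwa" _ h1]
  have h2' : ∀ p ∈ l ++ [("nazwa", [(pvSplit v).getD 0 ""])], p.1 ≠ "postac" := by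
    intro p hp
    rcases List.mem_append.1 hp with hp | hp
    · exact h2 p hp
    · simp at hp; subst hp; simp
  rw [pv_get?_mk_none _ "postac" h2']
  dsimp only
  rw [pv_insert_mk_fresh _ "postac" _ h2']
  have h3' : ∀ p ∈ l ++ [("nazwa", [(pvSplit v).getD 0 ""])] ++ [("postac", [(pvSplit v).getD 1 ""])], p.1 ≠ "dawka" := by
    intro p hp
    rcases List.mem_append.1 hp with hp | hp
    · rcases List.mem_append.1 hp with hp | hp
      · exact h3 p hp
      · simp at hp; subst hp; simp
    · simp at hp; subst hp; simp
  rw [pv_get?_mk_none _ "dawka" h3']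
  dsimp only
  rw [pv_insert_mk_fresh _ "dawka" _ h3']
  simp [pvBlock, pvPart]

lemma pvA_npd (vs : List String) (l : List (String × List String)) (hvs : vs ≠ [])
    (h : ∀ p ∈ l, p.1 ≠ "nazwa" ∧ p.1 ≠ "postac" ∧ p.1 ≠ "dawka") :
    vs.foldl pvAInner (PySem.Dict.mk l)
      = PySem.Dict.mk (l ++ pvBlock (vs.map (pvPart 0)) (vs.map (pvPart 1)) (vs.map (pvPart 2))) := by
  cases vs with
  | nil => exact absurd rfl hvs
  | cons v vs =>
    rw [List.foldl_cons, pvAInner_start l v h, pvAInner_foldBlock vs l _ _ _ h]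
    simp


def pvKeysOf (kv : String × List String) : List String :=
  if kv.1 = "nazwa_postac_dawka" then (if kv.2 = [] then [] else ["nazwa", "postac", "dawka"])
  else [kv.1]

def pvColsOf (kv : String × List String) : List (List String) :=
  if kv.1 = "nazwa_postac_dawka" then
    (if kv.2 = [] then [] else
      [kv.2.map (pvPart 0), kv.2.map (pvPart 1), kv.2.map (pvPart 2)])
  else if kv.1 = "ean" then [kv.2.map (fun v => "0" ++ v)]
  else [kv.2]

def pvL (data : List (String × List String)) : List (String × List String) :=
  data.flatMap (fun kv => (pvKeysOf kv).zip (pvColsOf kv))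

lemma pvAfold (data : List (String × List String)) : ∀ (l : List (String × List String)),
    ((l.map Prod.fst) ++ data.flatMap pvKeysOf).Nodup →
    data.foldl pvAStep (PySem.Dict.mk l) = PySem.Dict.mk (l ++ pvL data) := by
  induction data with
  | nil => intro l h; simp [pvL]
  | cons kv t ih =>
    intro l h
    rw [List.foldl_cons]
    have hstep : pvAStep (PySem.Dict.mk l) kv
        = PySem.Dict.mk (l ++ (pvKeysOf kv).zip (pvColsOf kv)) := by
      by_cases hk : kv.1 = "nazwa_postac_dawka"
      · rcases hvs : kv.2 with _ | ⟨v, vs⟩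
        · simp [pvAStep, hk, hvs, pvKeysOf, pvColsOf]
        · have hfresh : ∀ p ∈ l, p.1 ≠ "nazwa" ∧ p.1 ≠ "postac" ∧ p.1 ≠ "dawka" := by
            intro p hp
            have hmem : p.1 ∈ l.map Prod.fst := List.mem_map_of_mem hp
            have hdisj := List.disjoint_of_nodup_append h
            have hK : ∀ k' ∈ ["nazwa", "postac", "dawka"], p.1 ≠ k' := by
              intro k' hk'
              intro hEq
              refine hdisj hmem ?_
              rw [List.mem_flatMap]
              refine ⟨kv, by simp, ?_⟩
              rw [hEq]
              simpa [pvKeysOf, hk, hvs] using hk'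
            exact ⟨hK "nazwa" (by simp), hK "postac" (by simp), hK "dawka" (by simp)⟩
          have : pvAStep (PySem.Dict.mk l) kv = kv.2.foldl pvAInner (PySem.Dict.mk l) := by
            simp [pvAStep, hk]
          rw [this, hvs, pvA_npd (v :: vs) l (by simp) hfresh]
          simp [pvKeysOf, pvColsOf, hk, hvs, pvBlock]
      · have hfresh : ∀ p ∈ l, p.1 ≠ kv.1 := by
          intro p hp hEq
          have hdisj := List.disjoint_of_nodup_append h
          have hmem : p.1 ∈ l.map Prod.fst := List.mem_map_of_mem hp
          rw [hEq] at hmem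
          refine hdisj hmem ?_
          rw [List.mem_flatMap]
          exact ⟨kv, by simp, by simp [pvKeysOf, hk]⟩
        by_cases he : kv.1 = "ean"
        · have : pvAStep (PySem.Dict.mk l) kv
              = (PySem.Dict.mk l).insert kv.1 (kv.2.map (fun v => "0" ++ v)) := by
            simp [pvAStep, hk, he]
          rw [this, pv_insert_mk_fresh _ _ _ hfresh]
          simp [pvKeysOf, pvColsOf, hk, he]
        · have : pvAStep (PySem.Dict.mk l) kv = (PySem.Dict.mk l).insert kv.1 kv.2 := by
            simp [pvAStep, hk, he]
          rw [this, pv_insert_mk_fresh _ _ _ hfresh]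
          simp [pvKeysOf, pvColsOf, hk, he]
    rw [hstep]
    have hkeys : (l ++ (pvKeysOf kv).zip (pvColsOf kv)).map Prod.fst
        = l.map Prod.fst ++ pvKeysOf kv := by
      rw [List.map_append]
      congr 1
      have hlen : (pvKeysOf kv).length = (pvColsOf kv).length := by
        by_cases hk : kv.1 = "nazwa_postac_dawka"
        · by_cases hvs : kv.2 = [] <;> simp [pvKeysOf, pvColsOf, hk, hvs]
        · by_cases he : kv.1 = "ean" <;> simp [pvKeysOf, pvColsOf, hk, he]
      exact List.map_fst_zip (le_of_eq hlen)
    rw [ih _ (by rw [hkeys, List.append_assoc]; simpa [List.flatMap_cons] using h)]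
    simp [pvL, List.flatMap_cons, List.append_assoc]


def pvRow (i : Nat) (data : List (String × List String)) : List (String × String) :=
  data.flatMap (fun kv => (pvKeysOf kv).zip ((pvColsOf kv).map (fun col => col.getD i "")))

lemma pvBfold (i : Nat) (data : List (String × List String)) : ∀ (l : List (String × String)),
    ((l.map Prod.fst) ++ data.flatMap pvKeysOf).Nodup →
    (∀ kv ∈ data, i < kv.2.length) →
    data.foldl (pvBStep i) (PySem.Dict.mk l) = PySem.Dict.mk (l ++ pvRow i data) := by
  induction data with
  | nil => intro l h hb; simp [pvRow]
  | cons kv t ih =>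
    intro l h hb
    have hik : i < kv.2.length := hb kv (by simp)
    have hget : PySem.List.pyGetD kv.2 (i : Int) "" = kv.2.getD i "" := by
      rw [PySem.List.pyGetD_natCast]
    rw [List.foldl_cons]
    have hstep : pvBStep i (PySem.Dict.mk l) kv
        = PySem.Dict.mk (l ++ (pvKeysOf kv).zip ((pvColsOf kv).map (fun col => col.getD i ""))) := by
      by_cases hk : kv.1 = "nazwa_postac_dawka"
      · have hvs : kv.2 ≠ [] := by intro hc; rw [hc] at hik; simp at hik
        have hfresh : ∀ p ∈ l, p.1 ≠ "nazwa" ∧ p.1 ≠ "postac" ∧ p.1 ≠ "dawka" := by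
          intro p hp
          have hmem : p.1 ∈ l.map Prod.fst := List.mem_map_of_mem hp
          have hdisj := List.disjoint_of_nodup_append h
          have hK : ∀ k' ∈ ["nazwa", "postac", "dawka"], p.1 ≠ k' := by
            intro k' hk'
            intro hEq
            refine hdisj hmem ?_
            rw [List.mem_flatMap]
            refine ⟨kv, by simp, ?_⟩
            rw [hEq]
            simpa [pvKeysOf, hk, hvs] using hk'
          exact ⟨hK "nazwa" (by simp), hK "postac" (by simp), hK "dawka" (by simp)⟩
        have h1 : ∀ p ∈ l, p.1 ≠ "nazwa" := fun p hp => (hfresh p hp).1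
        have h2 : ∀ p ∈ l ++ [("nazwa", PySem.List.pyGetD (pvSplit (PySem.List.pyGetD kv.2 (i:Int) "")) 0 "")], p.1 ≠ "postac" := by
          intro p hp
          rcases List.mem_append.1 hp with hp | hp
          · exact (hfresh p hp).2.1
          · simp at hp; subst hp; simp
        have h3 : ∀ p ∈ l ++ [("nazwa", PySem.List.pyGetD (pvSplit (PySem.List.pyGetD kv.2 (i:Int) "")) 0 "")]
              ++ [("postac", PySem.List.pyGetD (pvSplit (PySem.List.pyGetD kv.2 (i:Int) "")) 1 "")], p.1 ≠ "dawka" := by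
          intro p hp
          rcases List.mem_append.1 hp with hp | hp
          · rcases List.mem_append.1 hp with hp | hp
            · exact (hfresh p hp).2.2
            · simp at hp; subst hp; simp
          · simp at hp; subst hp; simp
        have hun : pvBStep i (PySem.Dict.mk l) kv
            = (((PySem.Dict.mk l).insert "nazwa" (PySem.List.pyGetD (pvSplit (PySem.List.pyGetD kv.2 (i:Int) "")) 0 "")).insert "postac"
                (PySem.List.pyGetD (pvSplit (PySem.List.pyGetD kv.2 (i:Int) "")) 1 "")).insert "dawka"
                (PySem.List.pyGetD (pvSplit (PySem.List.pyGetD kv.2 (i:Int) "")) 2 "") := by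
          simp [pvBStep, hk]
        rw [hun]
        rw [pv_insert_mk_fresh _ _ _ h1, pv_insert_mk_fresh _ _ _ h2, pv_insert_mk_fresh _ _ _ h3]
        have hp0 : PySem.List.pyGetD (pvSplit (PySem.List.pyGetD kv.2 (i:Int) "")) 0 ""
            = (kv.2.map (pvPart 0)).getD i "" := by
          rw [PySem.List.pyGetD_ofNat', hget]
          have hx := List.getD_eq_getElem kv.2 "" hik
          rw [hx]
          have hy := List.getD_eq_getElem (kv.2.map (pvPart 0)) "" (by simpa using hik)
          rw [hy, List.getElem_map]
          rfl
        have hp1 : PySem.List.pyGetD (pvSplit (PySem.List.pyGetD kv.2 (i:Int) "")) 1 ""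
            = (kv.2.map (pvPart 1)).getD i "" := by
          rw [PySem.List.pyGetD_ofNat', hget]
          have hx := List.getD_eq_getElem kv.2 "" hik
          rw [hx]
          have hy := List.getD_eq_getElem (kv.2.map (pvPart 1)) "" (by simpa using hik)
          rw [hy, List.getElem_map]
          rfl
        have hp2 : PySem.List.pyGetD (pvSplit (PySem.List.pyGetD kv.2 (i:Int) "")) 2 ""
            = (kv.2.map (pvPart 2)).getD i "" := by
          rw [PySem.List.pyGetD_ofNat', hget]
          have hx := List.getD_eq_getElem kv.2 "" hik
          rw [hx]
          have hy := List.getD_eq_getElem (kv.2.map (pvPart 2)) "" (by simpa using hik)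
          rw [hy, List.getElem_map]
          rfl
        rw [hp0, hp1, hp2]
        simp [pvKeysOf, pvColsOf, hk, hvs, pvBlock]
      · have hfresh : ∀ p ∈ l, p.1 ≠ kv.1 := by
          intro p hp hEq
          have hdisj := List.disjoint_of_nodup_append h
          have hmem : p.1 ∈ l.map Prod.fst := List.mem_map_of_mem hp
          rw [hEq] at hmem
          refine hdisj hmem ?_
          rw [List.mem_flatMap]
          exact ⟨kv, by simp, by simp [pvKeysOf, hk]⟩
        have hgd := List.getD_eq_getElem kv.2 "" hik
        by_cases he : kv.1 = "ean"
        · have : pvBStep i (PySem.Dict.mk l) kv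
              = (PySem.Dict.mk l).insert kv.1 ("0" ++ PySem.List.pyGetD kv.2 (i:Int) "") := by
            simp [pvBStep, hk, he]
          rw [this, pv_insert_mk_fresh _ _ _ hfresh, hget, hgd]
          have : (kv.2.map (fun v => "0" ++ v)).getD i "" = "0" ++ kv.2[i]'hik := by
            rw [List.getD_eq_getElem _ "" (by simpa using hik), List.getElem_map]
          simp [pvKeysOf, pvColsOf, hk, he, this]
          rw [List.getElem?_eq_getElem hik]
          simp
        · have : pvBStep i (PySem.Dict.mk l) kv
              = (PySem.Dict.mk l).insert kv.1 (PySem.List.pyGetD kv.2 (i:Int) "") := by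
            simp [pvBStep, hk, he]
          rw [this, pv_insert_mk_fresh _ _ _ hfresh, hget, hgd]
          simp [pvKeysOf, pvColsOf, hk, he, hgd]
          rw [List.getElem?_eq_getElem hik]
          simp
    rw [hstep]
    have hkeys : (l ++ (pvKeysOf kv).zip ((pvColsOf kv).map (fun col => col.getD i ""))).map Prod.fst
        = l.map Prod.fst ++ pvKeysOf kv := by
      rw [List.map_append]
      congr 1
      have hlen : (pvKeysOf kv).length = ((pvColsOf kv).map (fun col => col.getD i "")).length := by
        by_cases hk : kv.1 = "nazwa_postac_dawka"
        · by_cases hvs : kv.2 = [] <;> simp [pvKeysOf, pvColsOf, hk, hvs]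
        · by_cases he : kv.1 = "ean" <;> simp [pvKeysOf, pvColsOf, hk, he]
      exact List.map_fst_zip (le_of_eq hlen)
    rw [ih _ (by rw [hkeys, List.append_assoc]; simpa [List.flatMap_cons] using h)
          (fun kv' hkv' => hb kv' (by simp [hkv']))]
    simp [pvRow, List.flatMap_cons, List.append_assoc]

def pvMin : List Nat → Nat
  | [] => 0
  | x :: t => t.foldl min x

lemma pv_foldl_min_le (t : List Nat) : ∀ (m : Nat), t.foldl min m ≤ m := by
  induction t with
  | nil => intro m; simp
  | cons x t ih => intro m; rw [List.foldl_cons]; exact le_trans (ih _) (min_le_left _ _)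

lemma pvMin_le_mem (ls : List Nat) (x : Nat) (hx : x ∈ ls) : pvMin ls ≤ x := by
  cases ls with
  | nil => simp at hx
  | cons y t =>
    rcases List.mem_cons.1 hx with h | h
    · subst h; exact pv_foldl_min_le t x
    · clear hx
      induction t generalizing y with
      | nil => simp at h
      | cons z t ih =>
        rcases List.mem_cons.1 h with h2 | h2
        · subst h2
          exact le_trans (pv_foldl_min_le t _) (min_le_right _ _)
        · exact ih _ h2

lemma pvMin_mem (ls : List Nat) (hne : ls ≠ []) : pvMin ls ∈ ls := by
  cases ls with
  | nil => exact absurd rfl hne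
  | cons y t =>
    clear hne
    show t.foldl min y ∈ y :: t
    induction t generalizing y with
    | nil => simp
    | cons z t ih =>
      rw [List.foldl_cons]
      rcases List.mem_cons.1 (ih (min y z)) with h | h
      · rcases min_cases y z with ⟨he, _⟩ | ⟨he, _⟩
        · rw [List.mem_cons]; left; rw [h, he]
        · rw [List.mem_cons]; right; rw [List.mem_cons]; left; rw [h, he]
      · rw [List.mem_cons]; right; rw [List.mem_cons]; right; exact h

lemma pvMin_eq_of_dominate (ls1 ls2 : List Nat) (h1 : ls1 ≠ []) (h2 : ls2 ≠ [])
    (d1 : ∀ x ∈ ls1, ∃ y ∈ ls2, y ≤ x) (d2 : ∀ y ∈ ls2, ∃ x ∈ ls1, x ≤ y) :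
    pvMin ls1 = pvMin ls2 := by
  apply le_antisymm
  · obtain ⟨x, hx, hle⟩ := d2 _ (pvMin_mem ls2 h2)
    exact le_trans (pvMin_le_mem ls1 x hx) hle
  · obtain ⟨y, hy, hle⟩ := d1 _ (pvMin_mem ls1 h1)
    exact le_trans (pvMin_le_mem ls2 y hy) hle

lemma pv_zip_map_snd {α β γ : Type} (g : β → γ) : ∀ (l1 : List α) (l2 : List β),
    (l1.zip l2).map (fun p => (p.1, g p.2)) = l1.zip (l2.map g) := by
  intro l1
  induction l1 with
  | nil => intro l2; simp
  | cons x t ih =>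
    intro l2
    cases l2 with
    | nil => simp
    | cons y t2 => simp [ih]

lemma pv_map_fst_map_snd_zip {α β γ : Type} (g : α × β → γ) : ∀ (L : List (α × β)),
    (L.map Prod.fst).zip (L.map g) = L.map (fun p => (p.1, g p)) := by
  intro L
  induction L with
  | nil => simp
  | cons p t ih => simp [ih]

lemma pv_ofList_items {ν : Type} (pairs : List (String × ν))
    (h : (pairs.map Prod.fst).Nodup) : (PySem.Dict.ofList pairs).items = pairs := by
  have := PySem.Dict.items_foldl_insert_fresh pairs Prod.fst Prod.snd PySem.Dict.empty
    (fun a _ => by simp [PySem.Dict.contains, PySem.Dict.empty]) h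
  simpa [PySem.Dict.ofList, PySem.Dict.update, PySem.Dict.empty] using this


lemma pv_keysOf_sub (kv : String × List String) (k : String) (hk : k ∈ pvKeysOf kv) :
    (kv.1 = "nazwa_postac_dawka" ∧ k ∈ (["nazwa", "postac", "dawka"] : List String)) ∨ k = kv.1 := by
  by_cases h : kv.1 = "nazwa_postac_dawka"
  · by_cases hvs : kv.2 = [] <;> simp [pvKeysOf, h, hvs] at hk
    · left; exact ⟨h, by simpa using hk⟩
  · right; simpa [pvKeysOf, h] using hk

lemma pv_flatMap_nodup (data : List (String × List String)) (hpre : Pre_return_list data) :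
    (data.flatMap pvKeysOf).Nodup := by
  obtain ⟨hnd, -, hcol⟩ := hpre
  induction data with
  | nil => simp
  | cons kv t ih =>
    rw [List.flatMap_cons, List.nodup_append]
    have hnd' : kv.1 ∉ t.map Prod.fst ∧ (t.map Prod.fst).Nodup := by
      simpa [List.nodup_cons] using hnd
    have hndt := hnd'.2
    have hhead := hnd'.1
    have hcolt : "nazwa_postac_dawka" ∈ t.map Prod.fst →
        "nazwa" ∉ t.map Prod.fst ∧ "postac" ∉ t.map Prod.fst ∧ "dawka" ∉ t.map Prod.fst := by
      intro hm
      have := hcol (by simp [hm])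
      exact ⟨fun hc => this.1 (by simp [hc]), fun hc => this.2.1 (by simp [hc]),
             fun hc => this.2.2 (by simp [hc])⟩
    refine ⟨?_, ih hndt hcolt, ?_⟩
    · by_cases h : kv.1 = "nazwa_postac_dawka"
      · by_cases hvs : kv.2 = [] <;> simp [pvKeysOf, h, hvs]
      · simp [pvKeysOf, h]
    · intro k hk1 k' hk2 hne
      subst hne
      rw [List.mem_flatMap] at hk2
      obtain ⟨kv', hkv't, hk'⟩ := hk2
      exfalso
      rcases pv_keysOf_sub kv k hk1 with ⟨hnpd, hk3⟩ | hk3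
      · rcases pv_keysOf_sub kv' k hk' with ⟨hnpd', hk4⟩ | hk4
        · exact hhead (by rw [hnpd]; rw [← hnpd']; exact List.mem_map_of_mem hkv't)
        · have hmemk : k ∈ (kv :: t).map Prod.fst := by
            rw [hk4]; exact List.mem_map_of_mem (by simp [hkv't])
          have hmemnpd : "nazwa_postac_dawka" ∈ (kv :: t).map Prod.fst := by
            rw [← hnpd]; exact List.mem_map_of_mem (by simp)
          have := hcol hmemnpd
          rcases (by simpa using hk3 : k = "nazwa" ∨ k = "postac" ∨ k = "dawka") with h | h | h <;> rw [h] at hmemk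
          · exact this.1 hmemk
          · exact this.2.1 hmemk
          · exact this.2.2 hmemk
      · rcases pv_keysOf_sub kv' k hk' with ⟨hnpd', hk4⟩ | hk4
        · have hmemk : k ∈ (kv :: t).map Prod.fst := by
            rw [hk3]; exact List.mem_map_of_mem (by simp)
          have hmemnpd : "nazwa_postac_dawka" ∈ (kv :: t).map Prod.fst := by
            rw [← hnpd']; exact List.mem_map_of_mem (by simp [hkv't])
          have := hcol hmemnpd
          rcases (by simpa using hk4 : k = "nazwa" ∨ k = "postac" ∨ k = "dawka") with h | h | h <;> rw [h] at hmemk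
          · exact this.1 hmemk
          · exact this.2.1 hmemk
          · exact this.2.2 hmemk
        · refine hhead ?_
          rw [← hk3, hk4]
          exact List.mem_map_of_mem hkv't

lemma pv_zip_len (kv : String × List String) (p : String × List String)
    (hp : p ∈ (pvKeysOf kv).zip (pvColsOf kv)) : p.2.length = kv.2.length := by
  by_cases h : kv.1 = "nazwa_postac_dawka"
  · by_cases hvs : kv.2 = [] <;> simp [pvKeysOf, pvColsOf, h, hvs] at hp
    rcases hp with h2 | h2 | h2 <;> subst h2 <;> simp
  · by_cases he : kv.1 = "ean" <;> simp [pvKeysOf, pvColsOf, h, he] at hp <;> subst hp <;> simp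

lemma pv_zip_ne (kv : String × List String) (hkv : ¬(kv.1 = "nazwa_postac_dawka" ∧ kv.2 = [])) :
    ∃ p ∈ (pvKeysOf kv).zip (pvColsOf kv), p.2.length = kv.2.length := by
  by_cases h : kv.1 = "nazwa_postac_dawka"
  · have hvs : kv.2 ≠ [] := fun hc => hkv ⟨h, hc⟩
    exact ⟨("nazwa", kv.2.map (pvPart 0)), by simp [pvKeysOf, pvColsOf, h, hvs], by simp⟩
  · by_cases he : kv.1 = "ean"
    · exact ⟨(kv.1, kv.2.map (fun v => "0" ++ v)), by simp [pvKeysOf, pvColsOf, h, he], by simp⟩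
    · exact ⟨(kv.1, kv.2), by simp [pvKeysOf, pvColsOf, h, he], by simp⟩

lemma pvL_keys (data : List (String × List String)) :
    (pvL data).map Prod.fst = data.flatMap pvKeysOf := by
  rw [pvL, List.map_flatMap]
  apply List.flatMap_congr
  intro kv _
  have hlen : (pvKeysOf kv).length = (pvColsOf kv).length := by
    by_cases hk : kv.1 = "nazwa_postac_dawka"
    · by_cases hvs : kv.2 = [] <;> simp [pvKeysOf, pvColsOf, hk, hvs]
    · by_cases he : kv.1 = "ean" <;> simp [pvKeysOf, pvColsOf, hk, he]
  exact List.map_fst_zip (le_of_eq hlen)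





lemma pv_new_data (data : List (String × List String)) (hpre : Pre_return_list data) :
    data.foldl pvAStep PySem.Dict.empty = PySem.Dict.mk (pvL data) := by
  have hnodupF := pv_flatMap_nodup data hpre
  have := pvAfold data [] (by simpa using hnodupF)
  simpa [PySem.Dict.empty] using this

lemma pv_rowA (data : List (String × List String)) (hpre : Pre_return_list data) (i : Nat) :
    (PySem.Dict.ofList (((pvL data).map Prod.fst).zip
        (((pvL data).map Prod.snd).map (fun col => col.getD i "")))).items
      = (pvL data).map (fun p => (p.1, p.2.getD i "")) := by
  rw [List.map_map, pv_map_fst_map_snd_zip ((fun col : List String => col.getD i "") ∘ Prod.snd) (pvL data)]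
  apply pv_ofList_items
  rw [List.map_map]
  have : (Prod.fst ∘ fun p : String × List String => (p.1, ((fun col => col.getD i "") ∘ Prod.snd) p))
      = Prod.fst := rfl
  rw [this, pvL_keys]
  exact pv_flatMap_nodup data hpre

lemma pv_rowB (data : List (String × List String)) (hpre : Pre_return_list data) (i : Nat)
    (hb : ∀ kv ∈ data, i < kv.2.length) :
    (data.foldl (pvBStep i) PySem.Dict.empty).items
      = (pvL data).map (fun p => (p.1, p.2.getD i "")) := by
  have h1 : data.foldl (pvBStep i) PySem.Dict.empty = PySem.Dict.mk (pvRow i data) := by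
    have := pvBfold i data [] (by simpa using pv_flatMap_nodup data hpre) hb
    simpa [PySem.Dict.empty] using this
  rw [h1]
  show pvRow i data = _
  rw [pvRow, pvL, List.map_flatMap]
  apply List.flatMap_congr
  intro kv _
  exact (pv_zip_map_snd (fun col : List String => col.getD i "") (pvKeysOf kv) (pvColsOf kv)).symm

theorem pv_main (data : List (String × List String)) (hpre : Pre_return_list data) (hD : ¬ D_return_list data) :
    return_list data = return_list_alt data := by
  have hA : return_list data
      = (pyZipStar ((pvL data).map Prod.snd)).map
          (fun vals => (PySem.Dict.ofList (((pvL data).map Prod.fst).zip vals)).items) := by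
    show (let new_data := data.foldl pvAStep PySem.Dict.empty
      (pyZipStar new_data.values).map
        (fun vals => (PySem.Dict.ofList (new_data.keys.zip vals)).items)) = _
    rw [pv_new_data data hpre]
    rfl
  rw [hA]
  cases hdata : data with
  | nil => simp [pvL, return_list_alt, pyZipStar]
  | cons kv0 rest =>
    obtain ⟨k0, v0⟩ := kv0
    subst hdata
    have hBn : return_list_alt ((k0, v0) :: rest)
        = (List.range (pvMin (((k0, v0) :: rest).map (fun kv => kv.2.length)))).map
            (fun i => (((k0, v0) :: rest).foldl (pvBStep i) PySem.Dict.empty).items) := by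
      have hmm : rest.foldl (fun m kv => min m kv.2.length) v0.length
          = pvMin (((k0, v0) :: rest).map (fun kv => kv.2.length)) := by
        show _ = (rest.map (fun kv => kv.2.length)).foldl min v0.length
        rw [List.foldl_map]
      show (List.range (rest.foldl (fun m kv => min m kv.2.length) v0.length)).map _ = _
      rw [hmm]
    rw [hBn]
    set data := (k0, v0) :: rest with hdata
    by_cases hnpde : ∃ kv ∈ data, kv.1 = "nazwa_postac_dawka" ∧ kv.2 = []
    · -- degenerate: the npd column is empty; both sides are []
      obtain ⟨kvs, hkvs, hks1, hks2⟩ := hnpde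
      have hB0 : pvMin (data.map (fun kv => kv.2.length)) = 0 := by
        have h0 : (0 : Nat) ∈ data.map (fun kv => kv.2.length) := by
          rw [List.mem_map]; exact ⟨kvs, hkvs, by rw [hks2]; rfl⟩
        exact Nat.le_zero.1 (pvMin_le_mem _ 0 h0)
      rw [hB0]
      simp only [List.range_zero, List.map_nil]
      rw [D_return_list] at hD
      push_neg at hD
      by_cases hE : ∃ kv ∈ data, kv.1 ≠ "nazwa_postac_dawka"
      · -- some non-npd column is empty too: A's row count is 0 as well
        obtain ⟨kv', hkv', hk'1, hk'2⟩ := hD ⟨kvs, hkvs, hks1, hks2⟩ hE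
        obtain ⟨p, hp, hplen⟩ := pv_zip_ne kv' (fun hc => hk'1 hc.1)
        have hpL : p ∈ pvL data := by
          rw [pvL, List.mem_flatMap]; exact ⟨kv', hkv', hp⟩
        have hp2 : p.2.length = 0 := by rw [hplen, hk'2]; rfl
        cases hc : (pvL data).map Prod.snd with
        | nil => simp [pyZipStar]
        | cons c cs =>
          have hn0 : cs.foldl (fun m c' => min m c'.length) c.length = 0 := by
            have hmem : p.2 ∈ (pvL data).map Prod.snd := List.mem_map_of_mem hpL
            rw [hc] at hmem
            have : pvMin ((c :: cs).map (fun col => col.length)) = 0 := by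
              refine Nat.le_zero.1 ?_
              have : (0 : Nat) ∈ (c :: cs).map (fun col => col.length) := by
                rw [List.mem_map]; exact ⟨p.2, hmem, hp2⟩
              exact pvMin_le_mem _ 0 this
            rw [← this]
            show _ = (cs.map (fun col => col.length)).foldl min c.length
            rw [List.foldl_map]
          have hz : pyZipStar (c :: cs) = (List.range (cs.foldl (fun m c' => min m c'.length) c.length)).map
              (fun i => (c :: cs).map (fun col => col.getD i "")) := rfl
          rw [hz, hn0]
          simp
      · -- every key is npd; with Nodup keys data is the single empty npd entry
        push_neg at hE
        have hL : pvL data = [] := by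
          rw [pvL, List.flatMap_eq_nil_iff]
          intro kv hkv
          have h1 : kv.1 = "nazwa_postac_dawka" := hE kv hkv
          have heq : kv = kvs := by
            have hinj := List.inj_on_of_nodup_map hpre.1
            exact hinj hkv hkvs (by rw [h1, hks1])
          rw [heq] at *
          simp [pvKeysOf, hks1, hks2]
        rw [hL]
        simp [pyZipStar]
    · -- main case: no empty npd column; row counts agree and rows agree
      have hLne : pvL data ≠ [] := by
        obtain ⟨p, hp, -⟩ := pv_zip_ne (k0, v0) (fun hc => hnpde ⟨(k0, v0), by simp [hdata], hc⟩)
        intro hc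
        have : p ∈ pvL data := by
          rw [pvL, List.mem_flatMap]; exact ⟨(k0, v0), by simp [hdata], hp⟩
        rw [hc] at this
        simp at this
      cases hc : (pvL data).map Prod.snd with
      | nil => exact absurd (by simpa using hc) hLne
      | cons c cs =>
        have hnA : cs.foldl (fun m c' => min m c'.length) c.length
            = pvMin ((pvL data).map (fun p => p.2.length)) := by
          have h1 : (pvL data).map (fun p => p.2.length)
              = ((pvL data).map Prod.snd).map (fun col => col.length) := by
            rw [List.map_map]; rfl
          rw [h1, hc]
          show _ = (cs.map (fun col => col.length)).foldl min c.length
          rw [List.foldl_map]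
        have hmin : pvMin ((pvL data).map (fun p => p.2.length))
            = pvMin (data.map (fun kv => kv.2.length)) := by
          apply pvMin_eq_of_dominate
          · intro hnil; exact hLne (by simpa using hnil)
          · simp [hdata]
          · intro x hx
            rw [List.mem_map] at hx
            obtain ⟨p, hpL, hpx⟩ := hx
            rw [pvL, List.mem_flatMap] at hpL
            obtain ⟨kv, hkv, hp⟩ := hpL
            refine ⟨kv.2.length, List.mem_map_of_mem hkv, ?_⟩
            rw [← hpx, pv_zip_len kv p hp]
          · intro y hy
            rw [List.mem_map] at hy
            obtain ⟨kv, hkv, hky⟩ := hy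
            obtain ⟨p, hp, hplen⟩ := pv_zip_ne kv (fun hc' => hnpde ⟨kv, hkv, hc'⟩)
            refine ⟨p.2.length, ?_, by rw [hplen, hky]⟩
            rw [List.mem_map]
            exact ⟨p, by rw [pvL, List.mem_flatMap]; exact ⟨kv, hkv, hp⟩, rfl⟩
        have hz : pyZipStar (c :: cs) = (List.range (cs.foldl (fun m c' => min m c'.length) c.length)).map
            (fun i => (c :: cs).map (fun col => col.getD i "")) := rfl
        rw [hz, hnA, hmin, List.map_map]
        apply List.map_congr_left
        intro i hi
        rw [List.mem_range] at hi
        have hb : ∀ kv ∈ data, i < kv.2.length := by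
          intro kv hkv
          exact lt_of_lt_of_le hi (pvMin_le_mem _ _ (List.mem_map_of_mem hkv))
        simp only [Function.comp_apply]
        rw [← hc, pv_rowA data hpre i, pv_rowB data hpre i hb]

theorem pv_exact (data : List (String × List String)) (hpre : Pre_return_list data) (hd : D_return_list data) :
    return_list data ≠ return_list_alt data := by
  obtain ⟨⟨kvs, hkvs, hs1, hs2⟩, ⟨kvE, hkvE, hE⟩, hF⟩ := hd
  -- B is []
  have hBnil : return_list_alt data = [] := by
    cases hdata : data with
    | nil => rw [hdata] at hkvs; simp at hkvs
    | cons kv0 rest =>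
      obtain ⟨k0, v0⟩ := kv0
      subst hdata
      have hmm : rest.foldl (fun m kv => min m kv.2.length) v0.length
          = pvMin (((k0, v0) :: rest).map (fun kv => kv.2.length)) := by
        show _ = (rest.map (fun kv => kv.2.length)).foldl min v0.length
        rw [List.foldl_map]
      have h0 : pvMin (((k0, v0) :: rest).map (fun kv => kv.2.length)) = 0 := by
        refine Nat.le_zero.1 ?_
        have : (0 : Nat) ∈ ((k0, v0) :: rest).map (fun kv => kv.2.length) := by
          rw [List.mem_map]; exact ⟨kvs, hkvs, by rw [hs2]; rfl⟩
        exact pvMin_le_mem _ 0 this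
      show (List.range (rest.foldl (fun m kv => min m kv.2.length) v0.length)).map _ = _
      rw [hmm, h0]
      simp
  rw [hBnil]
  -- A is nonempty
  have hA : return_list data
      = (pyZipStar ((pvL data).map Prod.snd)).map
          (fun vals => (PySem.Dict.ofList (((pvL data).map Prod.fst).zip vals)).items) := by
    show (let new_data := data.foldl pvAStep PySem.Dict.empty
      (pyZipStar new_data.values).map
        (fun vals => (PySem.Dict.ofList (new_data.keys.zip vals)).items)) = _
    rw [pv_new_data data hpre]
    rfl
  rw [hA]
  have hLmem : ∀ p ∈ pvL data, 1 ≤ p.2.length := by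
    intro p hp
    rw [pvL, List.mem_flatMap] at hp
    obtain ⟨kv, hkv, hpz⟩ := hp
    by_cases hk : kv.1 = "nazwa_postac_dawka"
    · have heq : kv = kvs := List.inj_on_of_nodup_map hpre.1 hkv hkvs (by rw [hk, hs1])
      rw [heq] at hpz
      simp [pvKeysOf, hs1, hs2] at hpz
    · have hlen := pv_zip_len kv p hpz
      have hne := hF kv hkv hk
      rw [hlen]
      exact Nat.one_le_iff_ne_zero.2 (fun hc => hne (List.eq_nil_of_length_eq_zero hc))
  have hLne : pvL data ≠ [] := by
    obtain ⟨p, hp, -⟩ := pv_zip_ne kvE (fun hc => hE hc.1)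
    intro hc
    have : p ∈ pvL data := by rw [pvL, List.mem_flatMap]; exact ⟨kvE, hkvE, hp⟩
    rw [hc] at this
    simp at this
  cases hc : (pvL data).map Prod.snd with
  | nil => exact absurd (by simpa using hc) hLne
  | cons c cs =>
    have hz : pyZipStar (c :: cs) = (List.range (cs.foldl (fun m c' => min m c'.length) c.length)).map
        (fun i => (c :: cs).map (fun col => col.getD i "")) := rfl
    rw [hz]
    have hnA : cs.foldl (fun m c' => min m c'.length) c.length
        = pvMin ((pvL data).map (fun p => p.2.length)) := by
      have h1 : (pvL data).map (fun p => p.2.length)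
          = ((pvL data).map Prod.snd).map (fun col => col.length) := by
        rw [List.map_map]; rfl
      rw [h1, hc]
      show _ = (cs.map (fun col => col.length)).foldl min c.length
      rw [List.foldl_map]
    have h1 : 1 ≤ pvMin ((pvL data).map (fun p => p.2.length)) := by
      have hmem := pvMin_mem ((pvL data).map (fun p => p.2.length))
        (by intro hnil; exact hLne (by simpa using hnil))
      rw [List.mem_map] at hmem
      obtain ⟨p, hp, hpe⟩ := hmem
      rw [← hpe]
      exact hLmem p hp
    intro hcon
    have hlen := congrArg List.length hcon
    simp [hnA] at hlen
    omega

-- ===== VERDICT (by name: the statement is the Claim_ definition above) =====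
theorem return_list_spec : Claim_unchanged_return_list := by
  intro data _ hpre hnd
  exact pv_main data hpre hnd

theorem return_list_changed : Claim_changed_return_list := by
  unfold Claim_changed_return_list
  decide

theorem return_list_tight : Claim_exact_return_list := by
  intro data _ hpre hd
  exact pv_exact data hpre hd
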